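-- pv_equiv track=rewrite | github.com/wwPDB/py-wwpdb_utils_nmr | wwpdb/utils/nmr/AlignUtil.py | letterToDigit
-- ===== SOURCE A (Python) =====
-- def letterToDigit(code: str, minDigit: int = 0) -> int:
--     """ Return digit from a given chain code.
--     """
--
--     alphabet = 'abcdefghijklmnopqrstuvwxyz'
--
--     unit = 1
--     digit = 0
--
--     if code is None:
--         return minDigit
--
--     for char in ''.join(reversed(code.lower())):
--
--         if char.isdigit():
--             digit += unit * int(char)
--         elif char.isalpha():
--             digit += unit * (alphabet.index(char) + 1)
--         else:
--             continue
--
--         unit *= 27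
--
--     return digit if digit > minDigit else minDigit
-- ===== SOURCE B (Python) =====
-- def letterToDigit(code: str, minDigit: int = 0) -> int:
--     """ Return digit from a given chain code.
--     Two staged passes: extract the base-27 digit values, then a Horner fold. """
--
--     if code is None:
--         return minDigit
--
--     vals = [_val(ch) for ch in code.lower() if ch.isdigit() or ch.isalpha()]
--
--     digit = 0
--     for v in vals:
--         digit = digit * 27 + v
--
--     return max(digit, minDigit)
--
--
-- def _val(ch: str) -> int:
--     return ord(ch) - 48 if ch.isdigit() else ord(ch) - 96
-- ===== Notes on version B (the rewrite author's own statement) =====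
-- stated objective: simpler
-- what changed: Replaced A's reversed-string iteration with a running power-of-27 multiplier by two staged passes: first extract each character's base-27 value into a list, then a forward Horner fold over that list, finishing with max(digit, minDigit).
import Mathlib
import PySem

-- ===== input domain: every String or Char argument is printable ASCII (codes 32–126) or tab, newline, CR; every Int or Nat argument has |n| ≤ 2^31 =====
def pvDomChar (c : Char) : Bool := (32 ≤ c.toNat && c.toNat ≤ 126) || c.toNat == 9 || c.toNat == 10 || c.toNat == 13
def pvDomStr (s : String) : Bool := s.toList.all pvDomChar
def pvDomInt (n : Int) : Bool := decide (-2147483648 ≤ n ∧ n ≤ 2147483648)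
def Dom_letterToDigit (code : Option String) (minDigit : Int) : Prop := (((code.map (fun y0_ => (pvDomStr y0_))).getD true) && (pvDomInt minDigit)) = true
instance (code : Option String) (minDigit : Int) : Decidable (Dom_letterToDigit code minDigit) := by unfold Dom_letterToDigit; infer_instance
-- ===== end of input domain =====

-- B replaces A's reversed iteration with a running power-of-27 multiplier by two staged
-- passes: extract each character's base-27 value into a list, then a Horner fold over it.

-- ===== PORT A =====
-- loop body of A: state (digit, power-multiplier); int(char) on a digit char is exactly char.toNat - 48;
-- alphabet.index(char) is ported as PySem.List.index? with getD 0 (the .index never fails on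
-- this branch: char is a lowercase ASCII letter, hence in the alphabet).
def pvStepA (st : Int × Int) (char : Char) : Int × Int :=
  if PySem.Chars.isdigit char then
    (st.1 + st.2 * ((char.toNat : Int) - 48), st.2 * 27)
  else if PySem.Chars.isalpha char then
    (st.1 + st.2 * (((PySem.List.index? "abcdefghijklmnopqrstuvwxyz".toList char).getD 0 : Int) + 1), st.2 * 27)
  else st

def letterToDigit (code : Option String) (minDigit : Int) : Int :=
  match code with
  | none => minDigit
  | some s =>
    let digit := ((PySem.Chars.lower s.toList).reverse.foldl pvStepA (0, 1)).1
    if digit > minDigit then digit else minDigit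

-- ===== PORT B =====
-- _val helper of B: ord arithmetic on an already-lowercased alphanumeric character
def pvVal (ch : Char) : Int :=
  if PySem.Chars.isdigit ch then (ch.toNat : Int) - 48 else (ch.toNat : Int) - 96

-- the list comprehension of B: keep alphanumeric characters, map them to their values
def pvVals (cs : List Char) : List Int :=
  (cs.filter (fun ch => PySem.Chars.isdigit ch || PySem.Chars.isalpha ch)).map pvVal

def letterToDigit_alt (code : Option String) (minDigit : Int) : Int :=
  match code with
  | none => minDigit
  | some s =>
    let digit := (pvVals (PySem.Chars.lower s.toList)).foldl (fun d v => d * 27 + v) 0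
    max digit minDigit

-- ===== PRECONDITION & SPEC =====
def Spec_letterToDigit (code : Option String) (minDigit : Int) (out : Int) : Prop := out = letterToDigit_alt code minDigit
instance (code : Option String) (minDigit : Int) (out : Int) : Decidable (Spec_letterToDigit code minDigit out) := by unfold Spec_letterToDigit; infer_instance

-- ===== CLAIM (what is proved, stated in full; the proofs are below) =====
def Claim_equal_letterToDigit : Prop := ∀ (code : Option String) (minDigit : Int), Dom_letterToDigit code minDigit → Spec_letterToDigit code minDigit (letterToDigit code minDigit)

-- ===== LEMMAS AND PROOFS =====

-- a lowercase ASCII letter's 1-based position in the alphabet is its code point minus 96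
lemma pv_alpha_val (c : Char) (h1 : 97 ≤ c.toNat) (h2 : c.toNat ≤ 122) :
    ((PySem.List.index? "abcdefghijklmnopqrstuvwxyz".toList c).getD 0 : Int) + 1 = (c.toNat : Int) - 96 := by
  obtain ⟨n, h1, h2, rfl⟩ : ∃ n : ℕ, 97 ≤ n ∧ n ≤ 122 ∧ c = Char.ofNat n :=
    ⟨c.toNat, h1, h2, (Char.ofNat_toNat c).symm⟩
  interval_cases n <;> decide

-- every alphabetic character produced by lowerChar is a lowercase letter
lemma pv_lower_islower (c : Char)
    (h : PySem.Chars.isalpha (PySem.Chars.lowerChar c) = true) :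
    97 ≤ (PySem.Chars.lowerChar c).toNat ∧ (PySem.Chars.lowerChar c).toNat ≤ 122 := by
  unfold PySem.Chars.lowerChar at *
  by_cases hu : PySem.Chars.isupper c = true
  · simp only [hu, if_pos] at h ⊢
    have hb : 65 ≤ c.toNat ∧ c.toNat ≤ 90 := by
      simp only [PySem.Chars.isupper, Bool.and_eq_true, decide_eq_true_eq, Char.le_def,
        UInt32.le_iff_toNat_le] at hu
      exact hu
    obtain ⟨n, h1, h2, rfl⟩ : ∃ n : ℕ, 65 ≤ n ∧ n ≤ 90 ∧ c = Char.ofNat n :=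
      ⟨c.toNat, hb.1, hb.2, (Char.ofNat_toNat c).symm⟩
    interval_cases n <;> decide
  · simp only [hu, if_neg, Bool.not_eq_true] at h ⊢
    simp only [PySem.Chars.isalpha, Bool.or_eq_true] at h
    rcases h with h | h
    · exact absurd h hu
    · simp only [PySem.Chars.islower, Bool.and_eq_true, decide_eq_true_eq, Char.le_def,
        UInt32.le_iff_toNat_le] at h
      exact h

-- Horner shift: starting B's fold at d multiplies d by 27 per value in the list
lemma pv_horner_shift (vs : List Int) (d : Int) :
    vs.foldl (fun d v => d * 27 + v) d
      = d * 27 ^ vs.length + vs.foldl (fun d v => d * 27 + v) 0 := by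
  induction vs generalizing d with
  | nil => simp
  | cons v vs ih =>
    simp only [List.foldl_cons, List.length_cons]
    rw [ih (d * 27 + v), ih (0 * 27 + v)]
    rw [pow_succ]; ring

-- main invariant: A's reversed fold computes B's staged Horner value
lemma pv_main (cs : List Char)
    (h : ∀ c ∈ cs, PySem.Chars.isalpha c = true → 97 ≤ c.toNat ∧ c.toNat ≤ 122)
    (d u : Int) :
    cs.reverse.foldl pvStepA (d, u)
      = (d + u * (pvVals cs).foldl (fun d v => d * 27 + v) 0, u * 27 ^ (pvVals cs).length) := by
  induction cs generalizing d u with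
  | nil => simp [pvVals]
  | cons c cs ih =>
    have hc : ∀ x ∈ cs, PySem.Chars.isalpha x = true → 97 ≤ x.toNat ∧ x.toNat ≤ 122 :=
      fun x hx => h x (List.mem_cons_of_mem c hx)
    simp only [List.reverse_cons, List.foldl_append, List.foldl_cons, List.foldl_nil]
    rw [ih hc d u]
    simp only [pvVals, List.filter_cons]
    by_cases h1 : PySem.Chars.isdigit c = true
    · simp only [h1, Bool.true_or, if_true, List.map_cons, List.foldl_cons, List.length_cons]
      conv_rhs => rw [pv_horner_shift]
      refine Prod.ext ?_ ?_ <;> simp [pvStepA, pvVal, h1, pow_succ] <;> ring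
    · by_cases h2 : PySem.Chars.isalpha c = true
      · have hv := pv_alpha_val c (h c (List.mem_cons_self) h2).1 (h c (List.mem_cons_self) h2).2
        simp only [h1, h2, Bool.false_or, if_true, List.map_cons, List.foldl_cons,
          List.length_cons]
        conv_rhs => rw [pv_horner_shift]
        refine Prod.ext ?_ ?_ <;>
          simp only [pvStepA, pvVal, h1, h2, if_false, if_true, Bool.false_eq_true, hv,
            pow_succ] <;> simp <;> ring
      · simp only [h1, h2, Bool.or_self, if_false, Bool.false_eq_true]
        refine Prod.ext ?_ ?_ <;> simp [pvStepA, h1, h2]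

-- ===== VERDICT (by name: the statement is the Claim_ definition above) =====
theorem letterToDigit_spec : Claim_equal_letterToDigit := by
  intro code minDigit _
  unfold Spec_letterToDigit letterToDigit letterToDigit_alt
  cases code with
  | none => rfl
  | some s =>
    have h : ∀ c ∈ PySem.Chars.lower s.toList,
        PySem.Chars.isalpha c = true → 97 ≤ c.toNat ∧ c.toNat ≤ 122 := by
      intro c hc ha
      simp only [PySem.Chars.lower, List.mem_map] at hc
      obtain ⟨c0, _, rfl⟩ := hc
      exact pv_lower_islower c0 ha
    simp only [pv_main (PySem.Chars.lower s.toList) h 0 1, zero_add, one_mul]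
    split_ifs with hgt <;> omega
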